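-- pv_equiv track=rewrite | github.com/Ks-Classic/numbers-ai | notebooks/chart_generator.py | build_main_rows
-- ===== SOURCE A (Python) =====
-- from typing import List, Optional, Tuple, Literal
--
-- class ChartGenerationError(Exception):
--     """予測表生成時のエラー"""
--     pass
--
-- def build_main_rows(nums: List[int]) -> List[List[int]]:
--     """メイン行を組み立てる
--
--     仕様: docs/design/表作成ルール.,md の「4. メイン行の組み立て（vFinal 4.1）」
--
--     Args:
--         nums: 元数字リスト
--
--     Returns:
--         メイン行の配列（各行は1〜4要素）
--     """
--     main_rows: List[List[int]] = []
--     temp_list = nums.copy()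
--
--     while len(temp_list) > 0:
--         # ユニーク値を昇順で取得
--         unique_digits = sorted(list(set(temp_list)))
--
--         if len(unique_digits) >= 4:
--             # 4種類以上の場合: 最初の4種類を構成メンバーとして使用
--             members = unique_digits[:4]
--             new_row: List[int] = []
--
--             # tempListから順に取り出してnewRowに格納
--             for member in members:
--                 idx = temp_list.index(member)
--                 new_row.append(temp_list[idx])
--                 temp_list.pop(idx)
--
--             main_rows.append(new_row)
--         else:
--             # 4種類未満の場合: ユニーク値のみを使用（最大値を繰り返し追加しない）
--             # 余りマスは apply_main_row_remaining_copy で補完される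
--             new_row = unique_digits.copy()
--
--             # tempListから使用した数字を削除（重複を考慮）
--             for digit in new_row:
--                 if digit in temp_list:
--                     temp_list.remove(digit)
--
--             main_rows.append(new_row)
--
--     if len(main_rows) == 0:
--         raise ChartGenerationError('メイン行が1本も生成されませんでした')
--
--     return main_rows
-- ===== SOURCE B (Python) =====
-- from typing import List
--
-- class ChartGenerationError(Exception):
--     """予測表生成時のエラー"""
--     pass
--
-- def build_main_rows(nums: List[int]) -> List[List[int]]:
--     # Count each value once, sort the distinct values once, then peel off
--     # the first <=4 (value, count) pairs per row, decrementing counts.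
--     counts = {}
--     for v in nums:
--         counts[v] = counts.get(v, 0) + 1
--     keys = sorted(counts)
--     if not keys:
--         raise ChartGenerationError('メイン行が1本も生成されませんでした')
--     pairs = [(k, counts[k]) for k in keys]
--     rows = []
--     while pairs:
--         head, tail = pairs[:4], pairs[4:]
--         rows.append([k for k, _ in head])
--         pairs = [(k, c - 1) for k, c in head if c > 1] + tail
--     return rows
-- ===== Notes on version B (the rewrite author's own statement) =====
-- stated objective: faster
-- what changed: Instead of re-sorting the distinct values of the whole remaining multiset and doing index/pop/remove scans on it every round, B counts and sorts the distinct values once up front and then peels the first <=4 (value, count) pairs off a sorted pair list per round, decrementing counts.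
import Mathlib
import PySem

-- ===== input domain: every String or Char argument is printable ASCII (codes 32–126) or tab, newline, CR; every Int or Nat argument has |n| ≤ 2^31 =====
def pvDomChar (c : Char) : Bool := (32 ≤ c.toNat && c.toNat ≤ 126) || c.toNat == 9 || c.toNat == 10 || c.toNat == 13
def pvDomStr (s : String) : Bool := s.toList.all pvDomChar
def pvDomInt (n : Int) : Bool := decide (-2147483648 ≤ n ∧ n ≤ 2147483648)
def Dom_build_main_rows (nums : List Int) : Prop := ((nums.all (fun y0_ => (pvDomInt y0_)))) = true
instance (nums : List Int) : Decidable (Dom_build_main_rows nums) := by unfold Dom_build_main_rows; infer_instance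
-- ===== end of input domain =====

-- B replaces A's per-round re-sort of the remaining multiset by one up-front
-- count-and-sort followed by peeling (value, count) pairs off a sorted list (objective: faster).

-- ===== PORT A =====
-- one step of A's inner 'for member in members' loop: idx = temp.index(member);
-- new_row.append(temp[idx]); temp.pop(idx)  (pop? returns (temp[idx], popped list), so
-- the appended element temp[idx] is exactly r.1); the 'none' arms are unreachable
-- because every member occurs in temp.
def pvATake (st : List Int × List Int) (member : Int) : List Int × List Int :=
  match PySem.List.index? st.1 member with
  | some idx =>
    match PySem.List.pop? st.1 (idx : Int) with
    | some r => (r.2, st.2 ++ [r.1])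
    | none => st
  | none => st

-- A's while-loop; fuel nums.length suffices because every iteration removes at least
-- one element from temp (when fuel hits 0, temp is already empty).
def pvALoop : Nat → List (List Int) → List Int → List (List Int)
  | 0, main_rows, _ => main_rows
  | fuel+1, main_rows, temp_list =>
    if temp_list.length > 0 then
      let unique_digits := PySem.List.sorted (PySem.Set.ofList temp_list) (fun x => x) false
      if unique_digits.length ≥ 4 then
        let members := PySem.List.slice unique_digits none (some 4)
        let st := members.foldl pvATake (temp_list, ([] : List Int))
        pvALoop fuel (main_rows ++ [st.2]) st.1
      else
        let new_row := unique_digits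
        let temp' := new_row.foldl
          (fun t digit => if digit ∈ t then (PySem.List.remove? t digit).getD t else t) temp_list
        pvALoop fuel (main_rows ++ [new_row]) temp'
    else main_rows

-- the final 'raise ChartGenerationError' on an empty result is excluded by Pre_
def build_main_rows (nums : List Int) : List (List Int) :=
  pvALoop nums.length [] nums

-- ===== PORT B =====
-- B's while-loop over the sorted (value, count) pairs.
def pvBLoop : Nat → List (List Int) → List (Int × Int) → List (List Int)
  | 0, rows, _ => rows
  | fuel+1, rows, pairs =>
    if pairs.length > 0 then
      let head := PySem.List.slice pairs none (some 4)
      let tail := PySem.List.slice pairs (some 4) none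
      pvBLoop fuel (rows ++ [head.map (fun p => p.1)])
        (((head.filter (fun p => decide (1 < p.2))).map (fun p => (p.1, p.2 - 1))) ++ tail)
    else rows

-- the 'raise ChartGenerationError' for empty input is excluded by Pre_
def build_main_rows_alt (nums : List Int) : List (List Int) :=
  let counts : PySem.Dict Int Int := nums.foldl (fun d v => d.insert v (d.getD v 0 + 1)) PySem.Dict.empty
  let keys := PySem.List.sorted counts.keys (fun x => x) false
  let pairs := keys.map (fun k => (k, counts.getD k 0))
  pvBLoop nums.length [] pairs

-- ===== PRECONDITION & SPEC =====
-- Pre_ excludes only the empty list, on which both A and B raise ChartGenerationError.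
def Pre_build_main_rows (nums : List Int) : Prop := nums ≠ []
instance (nums : List Int) : Decidable (Pre_build_main_rows nums) := by unfold Pre_build_main_rows; infer_instance
def pvWitness_build_main_rows : List Int := [1, 2]

def Spec_build_main_rows (nums : List Int) (out : List (List Int)) : Prop := out = build_main_rows_alt nums
instance (nums : List Int) (out : List (List Int)) : Decidable (Spec_build_main_rows nums out) := by unfold Spec_build_main_rows; infer_instance

-- ===== CLAIM (what is proved, stated in full; the proofs are below) =====
def Claim_equal_build_main_rows : Prop := ∀ (nums : List Int), Dom_build_main_rows nums → Pre_build_main_rows nums → Spec_build_main_rows nums (build_main_rows nums)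

-- ===== LEMMAS AND PROOFS =====

-- the sorted list of distinct values still in temp
def pvU (temp : List Int) : List Int := PySem.List.sorted (PySem.Set.ofList temp) (fun x => x) false
-- the sorted (value, count) pairs B maintains, expressed from A's state temp
def pvToPairs (temp : List Int) : List (Int × Int) := (pvU temp).map (fun k => (k, (temp.count k : Int)))
-- removing one occurrence of each row value, the common shape of A's two branches
def pvErs (row temp : List Int) : List Int := row.foldl (fun t d => t.erase d) temp

theorem pv_mem_pvU (temp : List Int) (k : Int) : k ∈ pvU temp ↔ k ∈ temp := by
  simp [pvU, PySem.List.mem_sorted, PySem.Set.mem_ofList]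

theorem pv_nodup_pvU (temp : List Int) : (pvU temp).Nodup :=
  ((PySem.List.sorted_perm (PySem.Set.ofList temp) (fun x => x) false).nodup_iff).mpr
    (PySem.Set.nodup_ofList temp)

theorem pv_pairwise_lt_pvU (temp : List Int) : (pvU temp).Pairwise (· < ·) := by
  have h1 := PySem.List.sorted_pairwise (PySem.Set.ofList temp) (fun x => x)
  have h2 := pv_nodup_pvU temp
  exact ((h1.and h2).imp (fun h => lt_of_le_of_ne h.1 h.2))

theorem pv_pvU_eq_nil_iff (temp : List Int) : pvU temp = [] ↔ temp = [] := by
  constructor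
  · intro h
    rcases temp with _ | ⟨x, t⟩
    · rfl
    · exact absurd ((pv_mem_pvU (x :: t) x).mpr (by simp)) (by simp [h])
  · intro h; subst h; rfl

theorem pv_count_erase_int (l : List Int) (a b : Int) (ha : a ∈ l) :
    ((l.erase a).count b : Int) = (l.count b : Int) - (if b = a then 1 else 0) := by
  rcases Decidable.em (b = a) with h|h
  · subst h
    have h1 := List.one_le_count_iff.mpr ha
    simp [List.count_erase_self]
    omega
  · simp [List.count_erase_of_ne h, h]

theorem pv_count_pvErs (row : List Int) : ∀ temp, row.Nodup → (∀ d ∈ row, d ∈ temp) →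
    ∀ k, ((pvErs row temp).count k : Int) = (temp.count k : Int) - (if k ∈ row then 1 else 0) := by
  induction row with
  | nil => intro temp _ _ k; simp [pvErs]
  | cons d rest ih =>
    intro temp hnd hmem k
    have hd : d ∈ temp := hmem d (by simp)
    have hrest : ∀ x ∈ rest, x ∈ temp.erase d := by
      intro x hx
      exact (List.mem_erase_of_ne (by rintro rfl; exact (List.nodup_cons.mp hnd).1 hx)).mpr
        (hmem x (by simp [hx]))
    have hih := ih (temp.erase d) (List.nodup_cons.mp hnd).2 hrest k
    have hce := pv_count_erase_int temp d k hd
    have hshape : pvErs (d :: rest) temp = pvErs rest (temp.erase d) := rfl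
    rw [hshape, hih, hce]
    by_cases h1 : k = d
    · subst h1
      have hkr : k ∉ rest := (List.nodup_cons.mp hnd).1
      simp [hkr]
    · by_cases h2 : k ∈ rest <;> simp [h1, h2]

theorem pv_mem_pvErs (row temp : List Int) (hnd : row.Nodup) (hmem : ∀ d ∈ row, d ∈ temp) (k : Int) :
    k ∈ pvErs row temp ↔ k ∈ temp ∧ (k ∈ row → 1 < temp.count k) := by
  have h := pv_count_pvErs row temp hnd hmem k
  constructor
  · intro hk
    have h1 : 1 ≤ (pvErs row temp).count k := List.one_le_count_iff.mpr hk
    by_cases h2 : k ∈ row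
    · simp [h2] at h
      have hkt : 1 < temp.count k := by omega
      exact ⟨List.one_le_count_iff.mp (by omega), fun _ => hkt⟩
    · simp [h2] at h
      exact ⟨List.one_le_count_iff.mp (by omega), fun hc => absurd hc h2⟩
  · rintro ⟨hk, hc⟩
    apply List.one_le_count_iff.mp
    by_cases h2 : k ∈ row
    · have := hc h2; simp [h2] at h; omega
    · have : 1 ≤ temp.count k := List.one_le_count_iff.mpr hk
      simp [h2] at h; omega

-- A's ≥4-branch inner loop removes the first occurrence of each (distinct) member
theorem pv_foldl_pvATake (members : List Int) : ∀ temp r, members.Nodup → (∀ m ∈ members, m ∈ temp) →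
    members.foldl pvATake (temp, r) = (pvErs members temp, r ++ members) := by
  induction members with
  | nil => intro temp r _ _; simp [pvErs]
  | cons m rest ih =>
    intro temp r hnd hmem
    have hm : m ∈ temp := hmem m (by simp)
    have hstep : pvATake (temp, r) m = (temp.erase m, r ++ [m]) := by
      obtain ⟨k, hk⟩ := Option.isSome_iff_exists.mp ((PySem.List.index?_isSome_iff temp m).mpr hm)
      obtain ⟨pre, suf, htemp, hlen, hpre⟩ := (PySem.List.index?_eq_some_iff temp m k).mp hk
      have hklt : k < temp.length := by subst htemp; simp; omega
      have hpop := PySem.List.pop?_natCast temp k hklt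
      simp only [pvATake, hk, hpop]
      subst htemp hlen
      rw [List.erase_append_right _ hpre]
      simp [List.eraseIdx_append_of_length_le (le_refl pre.length),
        List.getElem_of_append rfl rfl]
    rw [List.foldl_cons, hstep]
    have hrest : ∀ x ∈ rest, x ∈ temp.erase m := by
      intro x hx
      exact (List.mem_erase_of_ne (by rintro rfl; exact (List.nodup_cons.mp hnd).1 hx)).mpr
        (hmem x (by simp [hx]))
    rw [ih (temp.erase m) (r ++ [m]) (List.nodup_cons.mp hnd).2 hrest]
    simp [pvErs]

-- A's <4-branch removal loop is the same erase fold
theorem pv_foldl_pvARemove (row : List Int) : ∀ temp, (∀ d ∈ row, d ∈ temp) → row.Nodup →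
    row.foldl (fun t digit => if digit ∈ t then (PySem.List.remove? t digit).getD t else t) temp
      = pvErs row temp := by
  induction row with
  | nil => intro temp _ _; simp [pvErs]
  | cons d rest ih =>
    intro temp hmem hnd
    have hd : d ∈ temp := hmem d (by simp)
    have hstep : (if d ∈ temp then (PySem.List.remove? temp d).getD temp else temp) = temp.erase d := by
      rw [if_pos hd, PySem.List.remove?_eq_some_erase temp d hd]; rfl
    have hrest : ∀ x ∈ rest, x ∈ temp.erase d := by
      intro x hx
      exact (List.mem_erase_of_ne (by rintro rfl; exact (List.nodup_cons.mp hnd).1 hx)).mpr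
        (hmem x (by simp [hx]))
    rw [List.foldl_cons, hstep, ih (temp.erase d) hrest (List.nodup_cons.mp hnd).2]
    rfl

-- the distinct sorted values after a round: exactly those that survive
theorem pv_pvU_pvErs (row temp : List Int) (hnd : row.Nodup) (hmem : ∀ d ∈ row, d ∈ temp) :
    pvU (pvErs row temp) = (pvU temp).filter (fun k => decide (k ∈ pvErs row temp)) := by
  apply PySem.List.sorted_id_eq_of_perm_of_pairwise
  · apply (List.perm_ext_iff_of_nodup ((pv_nodup_pvU temp).filter _) (PySem.Set.nodup_ofList _)).mpr
    intro a
    simp only [List.mem_filter, PySem.Set.mem_ofList, pv_mem_pvU, decide_eq_true_eq]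
    constructor
    · exact fun h => h.2
    · intro h
      exact ⟨((pv_mem_pvErs row temp hnd hmem a).mp h).1, h⟩
  · exact List.Pairwise.filter _ ((pv_pairwise_lt_pvU temp).imp (fun h => le_of_lt h))

theorem pv_row_nodup (temp : List Int) : ((pvU temp).take 4).Nodup :=
  (pv_nodup_pvU temp).sublist (List.take_sublist 4 _)

theorem pv_row_mem (temp : List Int) : ∀ d ∈ (pvU temp).take 4, d ∈ temp := by
  intro d hd
  exact (pv_mem_pvU temp d).mp (List.mem_of_mem_take hd)

-- one round of B's pair bookkeeping matches one round of A's multiset surgery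
theorem pv_round_pairs (temp : List Int) :
    pvToPairs (pvErs ((pvU temp).take 4) temp) =
      ((((pvToPairs temp).take 4).filter (fun p => decide (1 < p.2))).map (fun p => (p.1, p.2 - 1)))
        ++ (pvToPairs temp).drop 4 := by
  have hnd := pv_row_nodup temp
  have hmem := pv_row_mem temp
  have hcnt := pv_count_pvErs ((pvU temp).take 4) temp hnd hmem
  have hmemE := pv_mem_pvErs ((pvU temp).take 4) temp hnd hmem
  -- left side
  rw [pvToPairs, pv_pvU_pvErs _ _ hnd hmem]
  -- split pvU temp into take 4 ++ drop 4
  conv_lhs => rw [show pvU temp = (pvU temp).take 4 ++ (pvU temp).drop 4 from (List.take_append_drop 4 _).symm]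
  rw [List.filter_append, List.map_append]
  -- right side
  rw [pvToPairs, ← List.map_take, ← List.map_drop, List.filter_map, List.map_map]
  congr 1
  · -- row part
    rw [List.filter_congr (q := fun k => decide (1 < (temp.count k : Int)))]
    · apply List.map_congr_left
      intro k hk
      have hk4 : k ∈ (pvU temp).take 4 := List.mem_of_mem_filter hk
      have h1 : (1 : Int) < temp.count k := by
        have := List.of_mem_filter hk
        simpa using this
      have := hcnt k
      simp only [hk4, if_pos] at this
      simp [this]
    · intro k hk
      have hkt : k ∈ temp := hmem k hk
      have hc1 : 1 ≤ temp.count k := List.one_le_count_iff.mpr hkt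
      have : k ∈ pvErs ((pvU temp).take 4) temp ↔ (1 : Int) < temp.count k := by
        rw [hmemE k]
        constructor
        · intro h; exact_mod_cast h.2 hk
        · intro h; exact ⟨hkt, fun _ => by exact_mod_cast h⟩
      simp [this]
  · -- drop part
    have hnotin : ∀ k ∈ (pvU temp).drop 4, k ∉ (pvU temp).take 4 := by
      intro k hk hk4
      exact (List.disjoint_take_drop (pv_nodup_pvU temp) (le_refl 4)) hk4 hk
    rw [List.filter_eq_self.mpr]
    · apply List.map_congr_left
      intro k hk
      have := hcnt k
      simp only [hnotin k hk, if_false] at this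
      simp at this
      simp [this]
    · intro k hk
      have hkt : k ∈ temp := (pv_mem_pvU temp k).mp (List.mem_of_mem_drop hk)
      simp [hmemE k, hkt, hnotin k hk]

-- the main loop equivalence, by induction on the (shared) fuel
theorem pv_loop_eq (fuel : Nat) : ∀ rows temp, pvALoop fuel rows temp = pvBLoop fuel rows (pvToPairs temp) := by
  induction fuel with
  | zero => intro rows temp; rfl
  | succ fuel ih =>
    intro rows temp
    rcases Decidable.em (temp = []) with h|h
    · subst h; rfl
    · have hu : pvU temp ≠ [] := fun hc => h ((pv_pvU_eq_nil_iff temp).mp hc)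
      have hlt : temp.length > 0 := List.length_pos_iff.mpr h
      have hplen : (pvToPairs temp).length = (pvU temp).length := by simp [pvToPairs]
      have hup : (pvToPairs temp).length > 0 := by
        rw [hplen]; exact List.length_pos_iff.mpr hu
      -- B side round
      have hBhead : PySem.List.slice (pvToPairs temp) none (some 4) = (pvToPairs temp).take 4 := by
        rw [PySem.List.slice_to _ (by norm_num)]; rfl
      have hBtail : PySem.List.slice (pvToPairs temp) (some 4) none = (pvToPairs temp).drop 4 := by
        rw [PySem.List.slice_from _ (by norm_num)]; rfl
      have hBrow : ((pvToPairs temp).take 4).map (fun p => p.1) = (pvU temp).take 4 := by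
        rw [pvToPairs, ← List.map_take, List.map_map]
        exact (List.map_congr_left (fun a _ => rfl)).trans (List.map_id _)
      have hers : pvToPairs (pvErs ((pvU temp).take 4) temp) =
          ((((pvToPairs temp).take 4).filter (fun p => decide (1 < p.2))).map (fun p => (p.1, p.2 - 1)))
            ++ (pvToPairs temp).drop 4 := pv_round_pairs temp
      show pvALoop (fuel+1) rows temp = pvBLoop (fuel+1) rows (pvToPairs temp)
      rw [pvALoop, pvBLoop]
      simp only [if_pos hlt, if_pos hup, hBhead, hBtail, hBrow,
        (show PySem.List.sorted (PySem.Set.ofList temp) (fun x => x) false = pvU temp from rfl)]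
      rcases Decidable.em ((pvU temp).length ≥ 4) with h4|h4
      · rw [if_pos h4]
        have hA := pv_foldl_pvATake ((pvU temp).take 4) temp [] (pv_row_nodup temp) (pv_row_mem temp)
        have hsl : PySem.List.slice (pvU temp) none (some 4)
            = (pvU temp).take 4 := by
          rw [PySem.List.slice_to _ (by norm_num)]; rfl
        rw [hsl, hA]
        simp only [List.nil_append]
        rw [ih, ← hers]
      · rw [if_neg h4]
        have hufull : (pvU temp).take 4 = pvU temp := by
          apply List.take_of_length_le
          have : (pvU temp).length < 4 := by
            simpa [pvU] using Nat.lt_of_not_le (fun hc => h4 hc)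
          omega
        have hR := pv_foldl_pvARemove (pvU temp) temp
          (fun d hd => (pv_mem_pvU temp d).mp hd) (pv_nodup_pvU temp)
        show pvALoop fuel (rows ++ [pvU temp]) _ = _
        rw [hR, show pvErs (pvU temp) temp = pvErs ((pvU temp).take 4) temp from by rw [hufull],
          show (rows ++ [pvU temp]) = rows ++ [(pvU temp).take 4] from by rw [hufull], ih, hers]

theorem pv_init_pairs (nums : List Int) :
    (PySem.List.sorted (nums.foldl (fun d v => d.insert v (d.getD v 0 + 1)) PySem.Dict.empty : PySem.Dict Int Int).keys (fun x => x) false).map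
      (fun k => (k, (nums.foldl (fun d v => d.insert v (d.getD v 0 + 1)) PySem.Dict.empty : PySem.Dict Int Int).getD k 0))
      = pvToPairs nums := by
  rw [PySem.Dict.foldl_insert_getD_add_one_eq_counter, PySem.Dict.keys_counter]
  apply List.map_congr_left
  intro k _
  rw [PySem.Dict.getD_counter]

-- ===== VERDICT (by name: the statement is the Claim_ definition above) =====
theorem build_main_rows_spec : Claim_equal_build_main_rows := by
  intro nums _ _
  unfold Spec_build_main_rows build_main_rows build_main_rows_alt
  dsimp only
  rw [pv_loop_eq, pv_init_pairs]
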